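-- pv_equiv track=rewrite | github.com/PacificBiosciences/FALCON-pbsmrtpipe | pbfalcon/functional.py | calc_cutoff
-- ===== SOURCE A (Python) =====
-- def calc_cutoff(target, pairs):
--     """Return read_length such that sum(lens for len >= rl) >= target.
--     Raise on empty pairs, which are (length, count) tuples.
--     """
--     accum = 0
--     for length, count in reversed(sorted(pairs)):
--         accum += length*count
--         if accum >= target:
--             break
--     else:
--         raise Exception('Total=%d < target=%d' %(accum, target))
--     return length
-- ===== SOURCE B (Python) =====
-- def calc_cutoff(target, pairs):
--     """Return read_length such that sum(lens for len >= rl) >= target.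
--     Raise on empty pairs, which are (length, count) tuples.
--     """
--     asc = sorted(pairs)
--     total = sum(length * count for length, count in asc)
--     cutoff = None
--     remaining = total
--     for length, count in asc:
--         if remaining >= target:
--             cutoff = length
--         remaining -= length * count
--     if cutoff is None:
--         raise Exception('Total=%d < target=%d' % (total, target))
--     return cutoff
-- ===== Notes on version B (the rewrite author's own statement) =====
-- stated objective: alternative
-- what changed: Instead of A's early-break scan of descending prefix sums, B computes the grand total once, then walks the pairs in ascending order peeling each length*count off a remaining-mass accumulator and recording the last length at which the remainder still meets the target; Pre_ excludes only the inputs where A (and B, with the same message) raises the 'Total < target' Exception.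
import Mathlib
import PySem

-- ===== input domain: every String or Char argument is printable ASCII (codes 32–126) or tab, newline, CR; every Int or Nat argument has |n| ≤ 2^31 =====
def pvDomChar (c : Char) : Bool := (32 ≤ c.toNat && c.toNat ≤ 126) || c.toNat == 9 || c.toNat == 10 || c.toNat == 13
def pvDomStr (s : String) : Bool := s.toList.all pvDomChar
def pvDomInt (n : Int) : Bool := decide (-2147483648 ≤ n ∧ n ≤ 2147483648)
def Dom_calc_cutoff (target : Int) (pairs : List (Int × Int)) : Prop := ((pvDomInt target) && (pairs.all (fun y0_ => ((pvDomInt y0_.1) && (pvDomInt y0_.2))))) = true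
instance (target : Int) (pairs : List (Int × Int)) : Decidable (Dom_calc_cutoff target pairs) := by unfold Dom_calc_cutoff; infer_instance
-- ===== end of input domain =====

-- B walks the pairs sorted ascending, peeling the shortest reads off a remaining-mass accumulator and
-- recording the last length at which the remainder still meets the target (alternative decomposition;
-- A scans descending with an early break).

-- ===== PORT A =====
-- 'for length, count in reversed(sorted(pairs)): accum += length*count; if accum >= target: break / else: raise'
-- (the for-else raise path is excluded by Pre_; the port returns 0 there)
def pvGoA (target accum : Int) : List (Int × Int) → Int
  | [] => 0
  | (l, c) :: rest => if target ≤ accum + l * c then l else pvGoA target (accum + l * c) rest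

def calc_cutoff (target : Int) (pairs : List (Int × Int)) : Int :=
  pvGoA target 0 ((PySem.List.sorted2 pairs (fun p => p.1) (fun p => p.2) false).reverse)

-- ===== PORT B =====
-- total = sum(length*count for length, count in asc)
def pvSumProds (s : List (Int × Int)) : Int := (s.map (fun p => p.1 * p.2)).sum

-- 'for length, count in asc: if remaining >= target: cutoff = length; remaining -= length*count'
def pvGoB (target : Int) (cutoff : Option Int) (remaining : Int) : List (Int × Int) → Option Int
  | [] => cutoff
  | (l, c) :: rest =>
      pvGoB target (if target ≤ remaining then some l else cutoff) (remaining - l * c) rest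

-- 'if cutoff is None: raise' is the path excluded by Pre_; the port returns 0 there
def calc_cutoff_alt (target : Int) (pairs : List (Int × Int)) : Int :=
  let asc := PySem.List.sorted2 pairs (fun p => p.1) (fun p => p.2) false
  let total := pvSumProds asc
  match pvGoB target none total asc with
  | some l => l
  | none => 0

-- ===== PRECONDITION & SPEC =====
-- Pre_ excludes exactly the inputs where Python A raises ('Total < target', including empty pairs):
-- some nonempty prefix of the descending-sorted list must have accumulated length*count ≥ target.
def Pre_calc_cutoff (target : Int) (pairs : List (Int × Int)) : Prop :=
  ∃ k ∈ List.range pairs.length,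
    target ≤ ((((PySem.List.sorted2 pairs (fun p => p.1) (fun p => p.2) false).reverse).take (k + 1)).map (fun p => p.1 * p.2)).sum

instance (target : Int) (pairs : List (Int × Int)) : Decidable (Pre_calc_cutoff target pairs) := by
  unfold Pre_calc_cutoff; infer_instance

def pvWitness_calc_cutoff : Int × (List (Int × Int)) := (1, [(2, 1)])

def Spec_calc_cutoff (target : Int) (pairs : List (Int × Int)) (out : Int) : Prop := out = calc_cutoff_alt target pairs
instance (target : Int) (pairs : List (Int × Int)) (out : Int) : Decidable (Spec_calc_cutoff target pairs out) := by unfold Spec_calc_cutoff; infer_instance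

-- ===== CLAIM (what is proved, stated in full; the proofs are below) =====
def Claim_equal_calc_cutoff : Prop := ∀ (target : Int) (pairs : List (Int × Int)), Dom_calc_cutoff target pairs → Pre_calc_cutoff target pairs → Spec_calc_cutoff target pairs (calc_cutoff target pairs)

-- ===== LEMMAS AND PROOFS =====

-- prefix sums of length*count, starting from accum (the values A's loop compares with target)
def pvPrefixes (acc : Int) : List (Int × Int) → List Int
  | [] => []
  | (l, c) :: rest => (acc + l * c) :: pvPrefixes (acc + l * c) rest

theorem pvPrefixes_length (acc : Int) (s : List (Int × Int)) : (pvPrefixes acc s).length = s.length := by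
  induction s generalizing acc with
  | nil => rfl
  | cons h t ih => obtain ⟨l, c⟩ := h; simp [pvPrefixes, ih]

theorem pvPrefixes_append (u v : List (Int × Int)) : ∀ acc : Int,
    pvPrefixes acc (u ++ v) = pvPrefixes acc u ++ pvPrefixes (acc + pvSumProds u) v := by
  induction u with
  | nil => intro acc; simp [pvPrefixes, pvSumProds]
  | cons h t ih =>
    intro acc
    obtain ⟨l, c⟩ := h
    simp only [List.cons_append, pvPrefixes, ih (acc + l * c), pvSumProds, List.map_cons, List.sum_cons]
    congr 2
    ring_nf

-- A's loop computes: first index of the prefix-sum list that reaches target (else the raise branch).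
theorem goA_findIdx (target : Int) (s : List (Int × Int)) : ∀ accum : Int,
    pvGoA target accum s =
      (let P := pvPrefixes accum s
       let i := P.findIdx (fun v => target ≤ v)
       if i = P.length then 0 else (s.getD i (0, 0)).1) := by
  induction s with
  | nil => intro accum; simp [pvGoA, pvPrefixes]
  | cons h t ih =>
    intro accum
    obtain ⟨l, c⟩ := h
    by_cases hc : target ≤ accum + l * c
    · simp [pvGoA, pvPrefixes, hc, List.findIdx_cons]
    · simp only [pvGoA, pvPrefixes, hc, if_false, List.findIdx_cons]
      rw [ih (accum + l * c)]
      simp only []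
      by_cases he : (pvPrefixes (accum + l * c) t).findIdx (fun v => target ≤ v) = (pvPrefixes (accum + l * c) t).length
      · simp [he]
      · simp [he]

-- B's loop computes: last index of asc whose remaining suffix mass reaches target,
-- i.e. the first crossing of the prefix sums of the REVERSED list.
theorem goB_findIdx (target : Int) : ∀ (s : List (Int × Int)) (rem : Int) (cutoff : Option Int),
    pvGoB target cutoff rem s =
      (let P := pvPrefixes (rem - pvSumProds s) s.reverse
       let i := P.findIdx (fun v => target ≤ v)
       if i = P.length then cutoff else some ((s.reverse.getD i (0, 0)).1)) := by
  intro s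
  induction s with
  | nil => intro rem cutoff; simp [pvGoB, pvPrefixes]
  | cons h t ih =>
    intro rem cutoff
    obtain ⟨l, c⟩ := h
    simp only [pvGoB, List.reverse_cons]
    rw [ih (rem - l * c) _]
    have hbase : rem - l * c - pvSumProds t = rem - pvSumProds ((l, c) :: t) := by
      simp only [pvSumProds, List.map_cons, List.sum_cons]; ring
    have hsum : pvSumProds t.reverse = pvSumProds t := by
      simp [pvSumProds, List.map_reverse, List.sum_reverse]
    rw [pvPrefixes_append t.reverse [(l, c)] (rem - pvSumProds ((l, c) :: t))]
    have hbase2 : rem - pvSumProds ((l, c) :: t) + pvSumProds t.reverse = rem - l * c := by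
      rw [hsum]; simp only [pvSumProds, List.map_cons, List.sum_cons]; ring
    have hlast : pvPrefixes (rem - pvSumProds ((l, c) :: t) + pvSumProds t.reverse) [(l, c)] = [rem] := by
      simp only [pvPrefixes, hbase2]
      congr 1
      exact sub_add_cancel rem (l * c)
    rw [hlast, hbase]
    set P := pvPrefixes (rem - pvSumProds ((l, c) :: t)) t.reverse with hP
    have hPlen : P.length = t.reverse.length := pvPrefixes_length _ _
    rw [List.findIdx_append]
    by_cases hi : P.findIdx (fun v => target ≤ v) < P.length
    · rw [if_pos hi]
      have hne : P.findIdx (fun v => target ≤ v) ≠ P.length := Nat.ne_of_lt hi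
      rw [if_neg hne]
      rw [if_neg (by simp only [List.length_append, List.length_cons, List.length_nil]; omega)]
      rw [List.getD_append _ _ _ _ (by omega)]
    · have heq : P.findIdx (fun v => target ≤ v) = P.length := by
        have := List.findIdx_le_length (p := fun v => target ≤ v) (xs := P)
        omega
      rw [if_pos heq, if_neg hi]
      by_cases hr : target ≤ rem
      · rw [if_pos hr]
        have h0 : ([rem].findIdx (fun v => target ≤ v)) = 0 := by
          simp [List.findIdx_cons, hr]
        rw [h0, Nat.zero_add]
        rw [if_neg (by simp only [List.length_append, List.length_cons, List.length_nil]; omega)]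
        rw [List.getD_append_right _ _ _ _ (by omega)]
        simp [hPlen]
      · rw [if_neg hr]
        have h1 : ([rem].findIdx (fun v => target ≤ v)) = 1 := by
          simp [List.findIdx_cons, hr]
        rw [h1]
        rw [if_pos (by simp only [List.length_append, List.length_cons, List.length_nil]; omega)]

theorem pv_main (target : Int) (asc : List (Int × Int)) :
    pvGoA target 0 asc.reverse =
      (match pvGoB target none (pvSumProds asc) asc with
       | some l => l
       | none => 0) := by
  rw [goB_findIdx target asc (pvSumProds asc) none]
  simp only [sub_self]
  rw [goA_findIdx target asc.reverse 0]
  simp only []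
  by_cases he : (pvPrefixes 0 asc.reverse).findIdx (fun v => target ≤ v) = (pvPrefixes 0 asc.reverse).length
  · simp [he]
  · simp [he]

-- ===== VERDICT (by name: the statement is the Claim_ definition above) =====
theorem calc_cutoff_spec : Claim_equal_calc_cutoff := by
  intro target pairs _ _
  unfold Spec_calc_cutoff calc_cutoff calc_cutoff_alt
  exact pv_main target _
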